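-- pv_equiv track=rewrite | github.com/RikiTwiki/o_mobile_operator_dagster | user_code/utils/transformers/mp_report.py | left_join_array
-- ===== SOURCE A (Python) =====
-- def left_join_array(left_list, right_list, key):
--
--     # 1) Собираем индекс для правой коллекции: значение ключа → сам словарь
--     right_index = {item[key]: item for item in right_list}
--
--     result = []
--     # 2) Для каждого элемента из левой коллекции
--     for left_item in left_list:
--         # Копируем, чтобы не мутировать оригинал
--         merged = left_item.copy()
--         join_value = left_item.get(key)
--
--         # 3) Ищем совпадение в правой коллекции
--         right_item = right_index.get(join_value)
--         if right_item:
--             # 4) Добавляем все поля из правого словаря,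
--             #    кроме повторяющегося ключа
--             for fld, val in right_item.items():
--                 if fld != key:
--                     merged[fld] = val
--
--         result.append(merged)
--
--     return result
-- ===== SOURCE B (Python) =====
-- def left_join_array(left_list, right_list, key):
--     # Stage 1: keep, for each join value, only the LAST right row having it.
--     seen = set()
--     winners = []
--     for r in reversed(right_list):
--         jv = r[key]
--         if jv not in seen:
--             seen.add(jv)
--             winners.append(r)
--     # Stage 2: copy the left rows and group their positions by join value.
--     result = [dict(row) for row in left_list]
--     buckets = {}
--     for i, row in enumerate(left_list):
--         buckets.setdefault(row.get(key), []).append(i)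
--     # Stage 3: right-major overlay -- each surviving right row patches every
--     # left row that joins with it.
--     for r in winners:
--         for i in buckets.get(r[key], []):
--             for f, v in r.items():
--                 if f != key:
--                     result[i][f] = v
--     return result
-- ===== Notes on version B (the rewrite author's own statement) =====
-- stated objective: alternative
-- what changed: B inverts the join: instead of A's per-left-row lookup in a prebuilt right-side index, B dedups the right rows last-wins, groups the left row positions by join value, and then overlays each surviving right row onto all left rows that join with it (right-major traversal).
import Mathlib
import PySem

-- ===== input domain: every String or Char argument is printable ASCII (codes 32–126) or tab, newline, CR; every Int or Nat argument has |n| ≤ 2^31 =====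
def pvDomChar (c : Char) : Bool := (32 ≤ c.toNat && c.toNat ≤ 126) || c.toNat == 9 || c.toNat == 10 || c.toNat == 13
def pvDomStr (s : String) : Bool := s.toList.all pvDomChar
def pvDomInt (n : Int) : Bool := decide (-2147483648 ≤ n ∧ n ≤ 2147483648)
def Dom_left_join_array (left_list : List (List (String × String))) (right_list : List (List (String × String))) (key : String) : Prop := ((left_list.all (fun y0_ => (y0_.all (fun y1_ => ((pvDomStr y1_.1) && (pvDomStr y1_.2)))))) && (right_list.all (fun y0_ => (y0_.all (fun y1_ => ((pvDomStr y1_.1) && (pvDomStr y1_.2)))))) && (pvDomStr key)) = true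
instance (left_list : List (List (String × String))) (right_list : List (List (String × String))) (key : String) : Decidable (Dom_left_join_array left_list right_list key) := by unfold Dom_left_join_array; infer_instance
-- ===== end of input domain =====

-- B replaces A's per-left-row index lookup by a right-major three-stage join:
-- dedup right rows last-wins, group left row positions by join value, then
-- overlay each surviving right row onto all joining left rows (alternative, not faster).


-- ===== PORT A =====
def left_join_array (left_list : List (List (String × String))) (right_list : List (List (String × String))) (key : String) : List (List (String × String)) :=
  -- right_index = {item[key]: item for item in right_list}; item[key] raises KeyError
  -- when the key is absent (excluded by Pre_); ported as getD "" there.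
  let right_index : PySem.Dict String (List (String × String)) :=
    right_list.foldl (fun d item => d.insert (((PySem.Dict.mk item).get? key).getD "") item) PySem.Dict.empty
  left_list.foldl (fun result left_item =>
    let merged : PySem.Dict String String := PySem.Dict.mk left_item
    let join_value : Option String := (PySem.Dict.mk left_item).get? key
    -- right_index.get(join_value): a None join_value never equals a string key
    let right_item : Option (List (String × String)) :=
      match join_value with
      | none => none
      | some v => right_index.get? v
    let merged :=
      match right_item with
      | some ri =>
          if ((PySem.Dict.mk ri).items).isEmpty then merged   -- 'if right_item:' truthiness
          else ((PySem.Dict.mk ri).items).foldl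
                 (fun (m : PySem.Dict String String) (p : String × String) => if p.1 ≠ key then m.insert p.1 p.2 else m) merged
      | none => merged
    result ++ [merged.items]) []

-- ===== PORT B =====
def left_join_array_alt (left_list : List (List (String × String))) (right_list : List (List (String × String))) (key : String) : List (List (String × String)) :=
  -- Stage 1: winners = the LAST right row per join value (first occurrences of reversed right_list);
  -- r[key] raises KeyError when absent (excluded by Pre_); ported as getD "".
  let winners : List (List (String × String)) :=
    (right_list.reverse.foldl
      (fun (st : PySem.Set String × List (List (String × String))) r =>
        let jv := ((PySem.Dict.mk r).get? key).getD ""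
        if st.1.contains jv then st else (st.1.add jv, st.2 ++ [r]))
      (PySem.Set.empty, [])).2
  -- Stage 2: copy the left rows and group their positions by join value
  let st2 :=
    left_list.foldl
      (fun (st : PySem.Dict (Option String) (List Nat) × List (PySem.Dict String String)) row =>
        (st.1.modify ((PySem.Dict.mk row).get? key) [] (· ++ [st.2.length]),
         st.2 ++ [PySem.Dict.mk row]))
      (PySem.Dict.empty, [])
  -- Stage 3: right-major overlay
  let result :=
    winners.foldl
      (fun res r =>
        let jv := ((PySem.Dict.mk r).get? key).getD ""
        (st2.1.getD (some jv) []).foldl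
          (fun res i =>
            res.set i
              (((PySem.Dict.mk r).items).foldl
                (fun (m : PySem.Dict String String) (p : String × String) => if p.1 ≠ key then m.insert p.1 p.2 else m)
                (res.getD i PySem.Dict.empty)))
          res)
      st2.2
  result.map (fun d => d.items)

-- ===== PRECONDITION & SPEC =====
-- Pre_ excludes exactly the inputs where the Python raises KeyError (a right item
-- without the join key); both A and B raise there (B's stage 1 reads every right row).
def Pre_left_join_array (left_list : List (List (String × String))) (right_list : List (List (String × String))) (key : String) : Prop :=
  ∀ item ∈ right_list, key ∈ item.map Prod.fst
instance (left_list : List (List (String × String))) (right_list : List (List (String × String))) (key : String) : Decidable (Pre_left_join_array left_list right_list key) := by unfold Pre_left_join_array; infer_instance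

def pvWitness_left_join_array : (List (List (String × String))) × (List (List (String × String))) × String :=
  ([[("id", "1"), ("x", "a")]], [[("id", "1"), ("y", "b")], [("id", "2"), ("y", "c")]], "id")

def Spec_left_join_array (left_list : List (List (String × String))) (right_list : List (List (String × String))) (key : String) (out : List (List (String × String))) : Prop := out = left_join_array_alt left_list right_list key
instance (left_list : List (List (String × String))) (right_list : List (List (String × String))) (key : String) (out : List (List (String × String))) : Decidable (Spec_left_join_array left_list right_list key out) := by unfold Spec_left_join_array; infer_instance

-- ===== CLAIM (what is proved, stated in full; the proofs are below) =====
def Claim_equal_left_join_array : Prop := ∀ (left_list : List (List (String × String))) (right_list : List (List (String × String))) (key : String), Dom_left_join_array left_list right_list key → Pre_left_join_array left_list right_list key → Spec_left_join_array left_list right_list key (left_join_array left_list right_list key)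

-- ===== LEMMAS AND PROOFS =====

-- the join value r[key] of a right row, as both ports compute it
def pvJvR (key : String) (r : List (String × String)) : String :=
  ((PySem.Dict.mk r).get? key).getD ""

-- the optional join value row.get(key) of a left row
def pvJvL (key : String) (row : List (String × String)) : Option String :=
  (PySem.Dict.mk row).get? key

-- the overlay of right row r onto an accumulated dict m (non-key fields, in r's order)
def pvOverlay (key : String) (m : PySem.Dict String String) (r : List (String × String)) : PySem.Dict String String :=
  ((PySem.Dict.mk r).items).foldl
    (fun m p => if p.1 ≠ key then m.insert p.1 p.2 else m) m

-- the positions (from n) of the left rows whose join value is c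
def pvBucketSpec (key : String) (L : List (List (String × String))) (c : Option String) (n : Nat) : List Nat :=
  match L with
  | [] => []
  | row :: t => if pvJvL key row = c then n :: pvBucketSpec key t c (n + 1) else pvBucketSpec key t c (n + 1)

-- A's right_index lookup is first-match search over the reversed right list
theorem pv_index_eq_find (right_list : List (List (String × String))) (key v : String) :
    (right_list.foldl (fun d item => d.insert (pvJvR key item) item) PySem.Dict.empty).get? v
      = right_list.reverse.find? (fun r => pvJvR key r == v) := by
  induction right_list using List.reverseRecOn with
  | nil => simp [PySem.Dict.get?_empty]
  | append_singleton R' r ih =>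
      rw [List.foldl_append, List.reverse_append]
      simp only [List.foldl_cons, List.foldl_nil, List.reverse_singleton, List.singleton_append,
        List.find?_cons]
      rw [PySem.Dict.get?_insert]
      by_cases h : pvJvR key r = v
      · simp [h]
      · have hb : (pvJvR key r == v) = false := by simp [h]
        rw [if_neg (fun hh : v = pvJvR key r => h hh.symm)]
        simp [hb, ih]

-- Stage 1 find?: the winners list finds the same first match as the scanned list
theorem pv_winners_find (l : List (List (String × String))) (key v : String) :
    ∀ (seen : PySem.Set String) (acc : List (List (String × String))),
    ((l.foldl (fun (st : PySem.Set String × List (List (String × String))) r =>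
        if st.1.contains (pvJvR key r) then st else (st.1.add (pvJvR key r), st.2 ++ [r]))
      (seen, acc)).2.find? (fun r => pvJvR key r == v))
    = (acc.find? (fun r => pvJvR key r == v)).or
        (if seen.contains v then none else l.find? (fun r => pvJvR key r == v)) := by
  induction l with
  | nil =>
      intro seen acc
      simp
  | cons r t ih =>
      intro seen acc
      simp only [List.foldl_cons]
      by_cases hc : seen.contains (pvJvR key r) = true
      · rw [if_pos hc, ih]
        by_cases hv : seen.contains v = true
        · have hv' : v ∈ seen := (PySem.Set.contains_iff _ _).mp hv
          simp [hv, hv']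
        · have hr : (pvJvR key r == v) = false := by
            cases hb : (pvJvR key r == v)
            · rfl
            · rw [eq_of_beq hb] at hc
              exact absurd hc hv
          simp only [Bool.not_eq_true] at hv
          simp [hv, List.find?_cons, hr]
      · rw [if_neg hc, ih]
        by_cases hr : pvJvR key r = v
        · subst hr
          have hadd : (seen.add (pvJvR key r)).contains (pvJvR key r) = true :=
            (PySem.Set.contains_iff _ _).mpr ((PySem.Set.mem_add _ _ _).mpr (Or.inr rfl))
          rw [List.find?_append, hadd]
          have hcf : seen.contains (pvJvR key r) = false := by
            simpa using hc
          simp only [List.find?_cons, beq_self_eq_true, hcf, if_false, Bool.false_eq_true, ite_false]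
          cases List.find? (fun r_1 => pvJvR key r_1 == pvJvR key r) acc <;> simp
        · have hadd : (seen.add (pvJvR key r)).contains v = seen.contains v := by
            cases hv : seen.contains v
            · rw [← Bool.not_eq_true]
              intro hb
              rcases (PySem.Set.mem_add _ _ _).mp ((PySem.Set.contains_iff _ _).mp hb) with h | h
              · rw [(PySem.Set.contains_iff _ _).mpr h] at hv
                exact Bool.noConfusion hv
              · exact hr h.symm
            · exact (PySem.Set.contains_iff _ _).mpr
                ((PySem.Set.mem_add _ _ _).mpr (Or.inl ((PySem.Set.contains_iff _ _).mp hv)))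
          rw [List.find?_append, hadd]
          have hfr : (pvJvR key r == v) = false := by simp [hr]
          simp [List.find?_cons, hfr, Option.or_assoc]

-- Stage 1: the winners' join values are distinct
theorem pv_winners_nodup (l : List (List (String × String))) (key : String) :
    ∀ (seen : PySem.Set String) (acc : List (List (String × String))),
    (acc.map (pvJvR key)).Nodup → (∀ r ∈ acc, seen.contains (pvJvR key r)) →
    (((l.foldl (fun (st : PySem.Set String × List (List (String × String))) r =>
        if st.1.contains (pvJvR key r) then st else (st.1.add (pvJvR key r), st.2 ++ [r]))
      (seen, acc)).2.map (pvJvR key)).Nodup) := by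
  induction l with
  | nil =>
      intro seen acc hnd _
      simpa using hnd
  | cons r t ih =>
      intro seen acc hnd hseen
      simp only [List.foldl_cons]
      by_cases hc : seen.contains (pvJvR key r) = true
      · rw [if_pos hc]
        exact ih seen acc hnd hseen
      · rw [if_neg hc]
        refine ih _ (acc ++ [r]) ?_ ?_
        · rw [List.map_append, List.nodup_append]
          refine ⟨hnd, by simp, ?_⟩
          intro x hx y hy
          simp only [List.map_cons, List.map_nil, List.mem_singleton] at hy
          subst hy
          rcases List.mem_map.mp hx with ⟨a, ha, rfl⟩
          intro hEq
          exact hc (hEq ▸ hseen a ha)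
        · intro x hx
          rcases List.mem_append.mp hx with h | h
          · exact (PySem.Set.contains_iff _ _).mpr
              ((PySem.Set.mem_add _ _ _).mpr (Or.inl ((PySem.Set.contains_iff _ _).mp (hseen x h))))
          · simp only [List.mem_singleton] at h
            subst h
            exact (PySem.Set.contains_iff _ _).mpr ((PySem.Set.mem_add _ _ _).mpr (Or.inr rfl))

-- Stage 2 characterisation: copies and buckets
theorem pv_stage2 (key : String) (L : List (List (String × String))) :
    ∀ (d : PySem.Dict (Option String) (List Nat)) (res : List (PySem.Dict String String)),
    (L.foldl
      (fun (st : PySem.Dict (Option String) (List Nat) × List (PySem.Dict String String)) row =>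
        (st.1.modify (pvJvL key row) [] (· ++ [st.2.length]), st.2 ++ [PySem.Dict.mk row]))
      (d, res)).2 = res ++ L.map (fun row => PySem.Dict.mk row)
    ∧ ∀ c, (L.foldl
      (fun (st : PySem.Dict (Option String) (List Nat) × List (PySem.Dict String String)) row =>
        (st.1.modify (pvJvL key row) [] (· ++ [st.2.length]), st.2 ++ [PySem.Dict.mk row]))
      (d, res)).1.getD c [] = d.getD c [] ++ pvBucketSpec key L c res.length := by
  induction L with
  | nil =>
      intro d res
      exact ⟨by simp, fun c => by simp [pvBucketSpec]⟩
  | cons row t ih =>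
      intro d res
      simp only [List.foldl_cons]
      obtain ⟨ih1, ih2⟩ := ih (d.modify (pvJvL key row) [] (· ++ [res.length])) (res ++ [PySem.Dict.mk row])
      refine ⟨by rw [ih1]; simp, ?_⟩
      intro c
      rw [ih2 c, List.length_append, PySem.Dict.getD_modify]
      simp only [List.length_cons, List.length_nil, Nat.zero_add]
      by_cases hc : c = pvJvL key row
      · subst hc
        rw [if_pos rfl, show pvBucketSpec key (row :: t) (pvJvL key row) res.length
              = res.length :: pvBucketSpec key t (pvJvL key row) (res.length + 1) by
            simp [pvBucketSpec]]
        simp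
      · rw [if_neg hc, show pvBucketSpec key (row :: t) c res.length
              = pvBucketSpec key t c (res.length + 1) by
            have h' : ¬ pvJvL key row = c := fun h => hc h.symm
            simp [pvBucketSpec, h']]

-- bucket members are at least the start index
theorem pv_bucketSpec_lb (key : String) (L : List (List (String × String))) (c : Option String) :
    ∀ n i, i ∈ pvBucketSpec key L c n → n ≤ i := by
  induction L with
  | nil => intro n i h; simp [pvBucketSpec] at h
  | cons row t ih =>
      intro n i h
      simp only [pvBucketSpec] at h
      by_cases hc : pvJvL key row = c
      · rw [if_pos hc] at h
        rcases List.mem_cons.mp h with h | h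
        · omega
        · have := ih (n + 1) i h; omega
      · rw [if_neg hc] at h
        have := ih (n + 1) i h; omega

theorem pv_bucketSpec_mem (key : String) (L : List (List (String × String))) (c : Option String) :
    ∀ n j, (n + j) ∈ pvBucketSpec key L c n ↔ ∃ h : j < L.length, pvJvL key L[j] = c := by
  induction L with
  | nil => intro n j; simp [pvBucketSpec]
  | cons row t ih =>
      intro n j
      cases j with
      | zero =>
          simp only [pvBucketSpec, Nat.add_zero]
          by_cases hc : pvJvL key row = c
          · simp [hc]
          · rw [if_neg hc]
            constructor
            · intro h
              have := pv_bucketSpec_lb key t c (n + 1) n h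
              omega
            · intro ⟨h1, h2⟩
              exact absurd h2 (by simpa using hc)
      | succ k =>
          simp only [pvBucketSpec, List.length_cons, List.getElem_cons_succ]
          have hstep : n + (k + 1) = (n + 1) + k := by omega
          by_cases hc : pvJvL key row = c
          · rw [if_pos hc, hstep, List.mem_cons]
            constructor
            · intro h
              rcases h with h | h
              · omega
              · rcases (ih (n + 1) k).mp h with ⟨h1, h2⟩
                exact ⟨by omega, h2⟩
            · intro ⟨h1, h2⟩
              exact Or.inr ((ih (n + 1) k).mpr ⟨by omega, h2⟩)
          · rw [if_neg hc, hstep]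
            constructor
            · intro h
              rcases (ih (n + 1) k).mp h with ⟨h1, h2⟩
              exact ⟨by omega, h2⟩
            · intro ⟨h1, h2⟩
              exact (ih (n + 1) k).mpr ⟨by omega, h2⟩

theorem pv_bucketSpec_nodup (key : String) (L : List (List (String × String))) (c : Option String) :
    ∀ n, (pvBucketSpec key L c n).Nodup := by
  induction L with
  | nil => intro n; simp [pvBucketSpec]
  | cons row t ih =>
      intro n
      simp only [pvBucketSpec]
      by_cases hc : pvJvL key row = c
      · rw [if_pos hc]
        refine List.Nodup.cons ?_ (ih (n + 1))
        intro h
        have := pv_bucketSpec_lb key t c (n + 1) n h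
        omega
      · rw [if_neg hc]
        exact ih (n + 1)

-- the inner stage-3 fold, per index
theorem pv_inner_get (key : String) (r : List (String × String)) :
    ∀ (idxs : List Nat), idxs.Nodup → ∀ (res : List (PySem.Dict String String)) (j : Nat),
    (idxs.foldl
      (fun res i => res.set i (pvOverlay key (res.getD i PySem.Dict.empty) r)) res)[j]?
    = if j ∈ idxs then (res[j]?).map (fun m => pvOverlay key m r) else res[j]? := by
  intro idxs
  induction idxs with
  | nil => intro _ res j; simp
  | cons i t ih =>
      intro hnd res j
      have hi : i ∉ t := (List.nodup_cons.mp hnd).1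
      have hnd' : t.Nodup := (List.nodup_cons.mp hnd).2
      simp only [List.foldl_cons]
      rw [ih hnd' _ j]
      by_cases hjt : j ∈ t
      · have hij : ¬ i = j := fun h => hi (h ▸ hjt)
        rw [if_pos hjt, List.getElem?_set, if_neg hij, if_pos (List.mem_cons_of_mem _ hjt)]
      · by_cases hji : j = i
        · subst hji
          rw [if_neg hjt, List.getElem?_set, if_pos rfl, if_pos (List.mem_cons_self ..)]
          by_cases hlen : j < res.length
          · rw [if_pos hlen, List.getD_eq_getElem?_getD, List.getElem?_eq_getElem hlen]
            simp
          · rw [if_neg hlen, List.getElem?_eq_none (by omega)]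
            simp
        · have hij : ¬ i = j := fun h => hji (Eq.symm h)
          rw [if_neg hjt, List.getElem?_set, if_neg hij, if_neg (by simp [hjt, hji])]

theorem pv_inner_length (key : String) (r : List (String × String))
    (idxs : List Nat) (res : List (PySem.Dict String String)) :
    (idxs.foldl
      (fun res i => res.set i (pvOverlay key (res.getD i PySem.Dict.empty) r)) res).length
    = res.length := by
  induction idxs generalizing res with
  | nil => rfl
  | cons i t ih => simp only [List.foldl_cons]; rw [ih]; exact List.length_set ..

-- the outer stage-3 fold, per index
theorem pv_stage3_get (key : String) (L : List (List (String × String))) :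
    ∀ (ws : List (List (String × String))), ((ws.map (pvJvR key)).Nodup) →
    ∀ (res : List (PySem.Dict String String)), res.length = L.length →
    (∀ j, (hj : j < L.length) → (ws.find? (fun r => some (pvJvR key r) == pvJvL key L[j])).isSome →
        res[j]? = some (PySem.Dict.mk L[j])) →
    ∀ j, (hj : j < L.length) →
    (ws.foldl
      (fun res r =>
        (pvBucketSpec key L (some (pvJvR key r)) 0).foldl
          (fun res i => res.set i (pvOverlay key (res.getD i PySem.Dict.empty) r)) res)
      res)[j]?
    = match ws.find? (fun r => some (pvJvR key r) == pvJvL key L[j]) with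
      | some r => some (pvOverlay key (PySem.Dict.mk L[j]) r)
      | none => res[j]? := by
  intro ws
  induction ws with
  | nil =>
      intro _ res _ _ j hj
      simp
  | cons r t ih =>
      intro hnd res hlen hpr j hj
      have hnd2 : (pvJvR key r :: t.map (pvJvR key)).Nodup := by simpa using hnd
      have hjvr : pvJvR key r ∉ t.map (pvJvR key) := (List.nodup_cons.mp hnd2).1
      have hndt : (t.map (pvJvR key)).Nodup := (List.nodup_cons.mp hnd2).2
      simp only [List.foldl_cons]
      have hbnd := pv_bucketSpec_nodup key L (some (pvJvR key r)) 0
      have hbmem : ∀ j', j' ∈ pvBucketSpec key L (some (pvJvR key r)) 0 ↔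
          ∃ h : j' < L.length, pvJvL key L[j'] = some (pvJvR key r) := by
        intro j'
        have := pv_bucketSpec_mem key L (some (pvJvR key r)) 0 j'
        simpa using this
      set res' := (pvBucketSpec key L (some (pvJvR key r)) 0).foldl
        (fun res i => res.set i (pvOverlay key (res.getD i PySem.Dict.empty) r)) res with hres'
      have hres'get : res'[j]? = if j ∈ pvBucketSpec key L (some (pvJvR key r)) 0
          then (res[j]?).map (fun m => pvOverlay key m r) else res[j]? := by
        rw [hres']; exact pv_inner_get key r _ hbnd res j
      have hlen' : res'.length = L.length := by
        rw [hres', pv_inner_length]; exact hlen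
      have hpr' : ∀ j', (hj' : j' < L.length) →
          (t.find? (fun r => some (pvJvR key r) == pvJvL key L[j'])).isSome →
          res'[j']? = some (PySem.Dict.mk L[j']) := by
        intro j' hj' hsome
        rcases Option.isSome_iff_exists.mp hsome with ⟨r', hr'⟩
        have hmem : r' ∈ t := List.mem_of_find?_eq_some hr'
        have hpred := List.find?_some hr'
        have heq : pvJvL key L[j'] = some (pvJvR key r') := (eq_of_beq hpred).symm
        have hnotb : j' ∉ pvBucketSpec key L (some (pvJvR key r)) 0 := by
          intro hb
          rcases (hbmem j').mp hb with ⟨_, h2⟩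
          rw [heq] at h2
          have : pvJvR key r' = pvJvR key r := by simpa using h2
          exact hjvr (this ▸ List.mem_map_of_mem hmem)
        rw [hres', pv_inner_get key r _ hbnd res j', if_neg hnotb]
        exact hpr j' hj' (by
          rw [List.find?_cons]
          cases hh : (some (pvJvR key r) == pvJvL key L[j']) <;> simp [hh, hr'])
      have hfin := ih hndt res' hlen' hpr' j hj
      rw [hfin]
      by_cases hhead : (some (pvJvR key r) == pvJvL key L[j]) = true
      · have hjv : pvJvL key L[j] = some (pvJvR key r) := (eq_of_beq hhead).symm
        have htnone : t.find? (fun r => some (pvJvR key r) == pvJvL key L[j]) = none := by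
          rw [List.find?_eq_none]
          intro x hx hb
          have : pvJvR key x = pvJvR key r := by
            have h2 := eq_of_beq hb
            rw [hjv] at h2
            exact Option.some_inj.mp h2
          exact hjvr (this ▸ List.mem_map_of_mem hx)
        rw [htnone]
        simp only [List.find?_cons, hhead]
        have hinb : j ∈ pvBucketSpec key L (some (pvJvR key r)) 0 := (hbmem j).mpr ⟨hj, hjv⟩
        rw [hres'get, if_pos hinb, hpr j hj (by simp [List.find?_cons, hhead])]
        rfl
      · have hhf : (some (pvJvR key r) == pvJvL key L[j]) = false := by simpa using hhead
        simp only [List.find?_cons, hhf]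
        have hnotb : j ∉ pvBucketSpec key L (some (pvJvR key r)) 0 := by
          intro hb
          rcases (hbmem j).mp hb with ⟨_, h2⟩
          exact hhead (by rw [h2]; simp)
        have : res'[j]? = res[j]? := by rw [hres'get, if_neg hnotb]
        cases hft : t.find? (fun r => some (pvJvR key r) == pvJvL key L[j]) <;> simp [hft, this]

-- proof-side renamings of the two ports (definitionally equal, checked by rfl below)
def pvANamed (left_list : List (List (String × String))) (right_list : List (List (String × String))) (key : String) : List (List (String × String)) :=
  left_list.foldl (fun result row =>
    result ++ [(match (match pvJvL key row with
                       | none => none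
                       | some v => (right_list.foldl
                           (fun (d : PySem.Dict String (List (String × String))) item =>
                             d.insert (pvJvR key item) item) PySem.Dict.empty).get? v) with
                | some ri =>
                    if ((PySem.Dict.mk ri).items).isEmpty then PySem.Dict.mk row
                    else pvOverlay key (PySem.Dict.mk row) ri
                | none => PySem.Dict.mk row).items]) []

def pvWinners (right_list : List (List (String × String))) (key : String) : List (List (String × String)) :=
  (right_list.reverse.foldl
    (fun (st : PySem.Set String × List (List (String × String))) r =>
      if st.1.contains (pvJvR key r) then st else (st.1.add (pvJvR key r), st.2 ++ [r]))
    (PySem.Set.empty, [])).2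

def pvStage2 (left_list : List (List (String × String))) (key : String) :
    PySem.Dict (Option String) (List Nat) × List (PySem.Dict String String) :=
  left_list.foldl
    (fun (st : PySem.Dict (Option String) (List Nat) × List (PySem.Dict String String)) row =>
      (st.1.modify (pvJvL key row) [] (· ++ [st.2.length]), st.2 ++ [PySem.Dict.mk row]))
    (PySem.Dict.empty, [])

def pvAltNamed (left_list : List (List (String × String))) (right_list : List (List (String × String))) (key : String) : List (List (String × String)) :=
  ((pvWinners right_list key).foldl
    (fun res r =>
      ((pvStage2 left_list key).1.getD (some (pvJvR key r)) []).foldl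
        (fun res i => res.set i (pvOverlay key (res.getD i PySem.Dict.empty) r)) res)
    (pvStage2 left_list key).2).map (fun d => d.items)

theorem pv_stage3_length (key : String) (L : List (List (String × String))) :
    ∀ (ws : List (List (String × String))) (res : List (PySem.Dict String String)),
    (ws.foldl
      (fun res r =>
        (pvBucketSpec key L (some (pvJvR key r)) 0).foldl
          (fun res i => res.set i (pvOverlay key (res.getD i PySem.Dict.empty) r)) res)
      res).length = res.length := by
  intro ws
  induction ws with
  | nil => intro res; rfl
  | cons r t ih =>
      intro res
      simp only [List.foldl_cons]
      rw [ih, pv_inner_length]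

-- ===== VERDICT (by name: the statement is the Claim_ definition above) =====
theorem left_join_array_spec : Claim_equal_left_join_array := by
  intro L R key _hdom hpre
  unfold Spec_left_join_array
  have hA : left_join_array L R key = pvANamed L R key := rfl
  have hB : left_join_array_alt L R key = pvAltNamed L R key := rfl
  rw [hA, hB]
  unfold pvANamed pvAltNamed
  rw [PySem.List.foldl_append_singleton_eq_map]
  have hbuck : ∀ c, (pvStage2 L key).1.getD c [] = pvBucketSpec key L c 0 := by
    intro c
    have h := (pv_stage2 key L PySem.Dict.empty []).2 c
    simpa [pvStage2] using h
  have hinit : (pvStage2 L key).2 = L.map (fun row => PySem.Dict.mk row) := by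
    have h := (pv_stage2 key L PySem.Dict.empty []).1
    simpa [pvStage2] using h
  simp only [hbuck, hinit]
  have hnd : ((pvWinners R key).map (pvJvR key)).Nodup := by
    unfold pvWinners
    exact pv_winners_nodup R.reverse key PySem.Set.empty [] (by simp) (by intro r h; simp at h)
  have hlenm : (L.map (fun row => PySem.Dict.mk row)).length = L.length := List.length_map ..
  have hpr : ∀ j, (hj : j < L.length) →
      ((pvWinners R key).find? (fun r => some (pvJvR key r) == pvJvL key L[j])).isSome →
      (L.map (fun row => PySem.Dict.mk row))[j]? = some (PySem.Dict.mk L[j]) := by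
    intro j hj _
    rw [List.getElem?_map, List.getElem?_eq_getElem hj]
    rfl
  apply List.ext_getElem?
  intro j
  by_cases hj : j < L.length
  · rw [List.nil_append, List.getElem?_map, List.getElem?_map,
      pv_stage3_get key L (pvWinners R key) hnd _ hlenm hpr j hj,
      List.getElem?_eq_getElem hj]
    cases hjv : pvJvL key L[j] with
    | none =>
        rw [List.find?_eq_none.mpr (fun x _ => by simp)]
        simp [hjv]
    | some v =>
        have hpredeq : (fun (r : List (String × String)) => some (pvJvR key r) == some v)
            = (fun r => pvJvR key r == v) := by
          funext r
          simp
        have hfw : (pvWinners R key).find? (fun r => pvJvR key r == v)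
            = R.reverse.find? (fun r => pvJvR key r == v) := by
          unfold pvWinners
          rw [pv_winners_find R.reverse key v PySem.Set.empty []]
          simp [PySem.Set.contains, PySem.Set.empty]
        rw [hpredeq, hfw, ← pv_index_eq_find R key v]
        simp only [Option.map_some, hjv]
        cases hfind : (R.foldl (fun (d : PySem.Dict String (List (String × String))) item =>
            d.insert (pvJvR key item) item) PySem.Dict.empty).get? v with
        | none => simp [hjv, hfind]
        | some ri =>
            have hmem : ri ∈ R := by
              have h1 : R.reverse.find? (fun r => pvJvR key r == v) = some ri := by
                rw [← pv_index_eq_find R key v]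
                exact hfind
              exact (List.mem_reverse).mp (List.mem_of_find?_eq_some h1)
            have hne : ((PySem.Dict.mk ri).items).isEmpty = false := by
              cases ri with
              | nil => exact absurd (hpre [] hmem) (by simp)
              | cons p rest => rfl
            simp [hjv, hfind, hne]
  · rw [List.nil_append]
    rw [List.getElem?_eq_none (by rw [List.length_map]; omega),
      List.getElem?_eq_none (by rw [List.length_map, pv_stage3_length, List.length_map]; omega)]
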